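-- pv_equiv track=rewrite | github.com/sunkashing/CMU_Flea_Market | CMU_Flea_Market/flea_market/views.py | row_to_column_order
-- ===== SOURCE A (Python) =====
-- cols = 5
--
-- def row_to_column_order(items):
--     res = []
--     items_list = [i for i in items]
--     if len(items_list) % cols != 0:
--         for i in range(cols - len(items_list) % cols):
--             items_list.append('null')
--
--     for x in range(cols):
--         for i, item in enumerate(items_list):
--             if i % cols == x:
--                 res.append(item)
--     return res
-- ===== SOURCE B (Python) =====
-- cols = 5
--
-- def row_to_column_order(items):
--     items_list = list(items)
--     if len(items_list) % cols != 0: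
--         items_list += ['null'] * (cols - len(items_list) % cols)
--     buckets = [[] for _ in range(cols)]
--     for i, item in enumerate(items_list):
--         buckets[i % cols].append(item)
--     res = []
--     for b in buckets:
--         res += b
--     return res
-- ===== Notes on version B (the rewrite author's own statement) =====
-- stated objective: faster
-- what changed: Single pass distributing items into 5 column buckets which are then concatenated, instead of 5 full scans of the padded list (one per column).
import Mathlib
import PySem

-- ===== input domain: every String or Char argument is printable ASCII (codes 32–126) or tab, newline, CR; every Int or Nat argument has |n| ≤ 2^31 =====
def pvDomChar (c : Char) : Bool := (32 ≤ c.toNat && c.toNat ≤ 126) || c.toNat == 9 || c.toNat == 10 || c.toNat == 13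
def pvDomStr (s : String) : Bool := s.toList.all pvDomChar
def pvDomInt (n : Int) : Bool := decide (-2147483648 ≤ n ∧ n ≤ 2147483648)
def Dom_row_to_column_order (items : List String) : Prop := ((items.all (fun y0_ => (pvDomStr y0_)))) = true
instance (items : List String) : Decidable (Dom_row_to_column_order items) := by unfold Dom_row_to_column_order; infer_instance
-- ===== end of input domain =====

-- B replaces A's five full scans of the padded list (one per column) by a single
-- distributing pass into five buckets that are then concatenated (objective: faster, constant factor).

-- ===== PORT A =====
def row_to_column_order (items : List String) : List String :=
  -- res = []; items_list = [i for i in items]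
  let itemsList := items.map (fun i => i)
  -- if len(items_list) % cols != 0: for i in range(cols - len(items_list) % cols): items_list.append('null')
  let itemsList :=
    if itemsList.length % 5 ≠ 0 then
      (PySem.List.pyRange 0 (5 - (itemsList.length : Int) % 5) 1).foldl
        (fun acc _ => acc ++ ["null"]) itemsList
    else itemsList
  -- for x in range(cols): for i, item in enumerate(items_list): if i % cols == x: res.append(item)
  (PySem.List.pyRange 0 5 1).foldl
    (fun res x =>
      (PySem.List.enumerate itemsList).foldl
        (fun res p => if p.1 % 5 == x then res ++ [p.2] else res) res)
    []

-- ===== PORT B =====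
def row_to_column_order_alt (items : List String) : List String :=
  -- items_list = list(items); if len % cols != 0: items_list += ['null'] * (cols - len % cols)
  let itemsList :=
    if items.length % 5 ≠ 0 then items ++ List.replicate (5 - items.length % 5) "null"
    else items
  -- buckets = [[] for _ in range(cols)]; for i, item in enumerate(items_list): buckets[i % cols].append(item)
  let buckets :=
    (PySem.List.enumerate itemsList).foldl
      (fun (b : List (List String)) p =>
        b.set (p.1 % 5).toNat (b.getD (p.1 % 5).toNat [] ++ [p.2]))
      [[], [], [], [], []]
  -- res = []; for b in buckets: res += b
  buckets.foldl (fun res b => res ++ b) []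

-- ===== PRECONDITION & SPEC =====
def Spec_row_to_column_order (items : List String) (out : List String) : Prop := out = row_to_column_order_alt items
instance (items : List String) (out : List String) : Decidable (Spec_row_to_column_order items out) := by unfold Spec_row_to_column_order; infer_instance

-- ===== CLAIM (what is proved, stated in full; the proofs are below) =====
def Claim_equal_row_to_column_order : Prop := ∀ (items : List String), Dom_row_to_column_order items → Spec_row_to_column_order items (row_to_column_order items)

-- ===== LEMMAS AND PROOFS =====

-- the padded list as A computes it (name for proof convenience; rfl-equal to A's let)
def pvPadA (items : List String) : List String :=
  if (items.map (fun i => i)).length % 5 ≠ 0 then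
    (PySem.List.pyRange 0 (5 - ((items.map (fun i => i)).length : Int) % 5) 1).foldl
      (fun acc _ => acc ++ ["null"]) (items.map (fun i => i))
  else items.map (fun i => i)

-- the padded list as B computes it
def pvPadB (items : List String) : List String :=
  if items.length % 5 ≠ 0 then items ++ List.replicate (5 - items.length % 5) "null"
  else items

-- column x of l, as A's inner filter produces it
def pvCol (x : Int) (l : List (Int × String)) : List String :=
  (l.filter (fun p => p.1 % 5 == x)).map Prod.snd

theorem pvCol_cons (x : Int) (p : Int × String) (l : List (Int × String)) :
    pvCol x (p :: l) = (if p.1 % 5 == x then [p.2] else []) ++ pvCol x l := by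
  by_cases h : p.1 % 5 = x <;> simp [pvCol, h]

-- A's padding loop appends one "null" per range element
theorem pvPadLoop (l : List Int) (acc : List String) :
    l.foldl (fun a (_ : Int) => a ++ ["null"]) acc = acc ++ List.replicate l.length "null" := by
  induction l generalizing acc with
  | nil => simp
  | cons h t ih =>
    rw [List.foldl_cons, ih, List.append_assoc, List.length_cons, List.replicate_succ]
    rfl

-- the two padded lists coincide
theorem pvPad_eq (items : List String) : pvPadA items = pvPadB items := by
  unfold pvPadA pvPadB
  simp only [List.map_id_fun', id]
  by_cases h : items.length % 5 = 0
  · simp [h]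
  · rw [if_pos h, if_pos h, pvPadLoop]
    have hc : (PySem.List.pyRange 0 (5 - (items.length : Int) % 5) 1).length
        = 5 - items.length % 5 := by
      rw [PySem.List.length_pyRange_one]; omega
    rw [hc]

-- A's inner loop is append-of-column (instance of foldl_append_if)
theorem pvInner (x : Int) (l : List (Int × String)) (res : List String) :
    l.foldl (fun res p => if p.1 % 5 == x then res ++ [p.2] else res) res
      = res ++ pvCol x l :=
  PySem.List.foldl_append_if (fun p => p.1 % 5 == x) Prod.snd l res

-- B's distributing pass, on an explicit 5-bucket state
theorem pvBuckets (l : List (Int × String)) (hl : ∀ p ∈ l, 0 ≤ p.1)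
    (b0 b1 b2 b3 b4 : List String) :
    l.foldl
      (fun (b : List (List String)) p =>
        b.set (p.1 % 5).toNat (b[(p.1 % 5).toNat]?.getD [] ++ [p.2]))
      [b0, b1, b2, b3, b4]
    = [b0 ++ pvCol 0 l, b1 ++ pvCol 1 l, b2 ++ pvCol 2 l, b3 ++ pvCol 3 l, b4 ++ pvCol 4 l] := by
  induction l generalizing b0 b1 b2 b3 b4 with
  | nil => simp [pvCol]
  | cons p t ih =>
    have hp : 0 ≤ p.1 := hl p (List.mem_cons_self ..)
    have ht : ∀ q ∈ t, 0 ≤ q.1 := fun q hq => hl q (List.mem_cons_of_mem _ hq)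
    have hm : p.1 % 5 = 0 ∨ p.1 % 5 = 1 ∨ p.1 % 5 = 2 ∨ p.1 % 5 = 3 ∨ p.1 % 5 = 4 := by omega
    rcases hm with h | h | h | h | h <;>
      simp [List.foldl_cons, h, ih ht, pvCol_cons]

-- enumerate indices are nonnegative
theorem pvEnumNonneg (l : List String) : ∀ p ∈ PySem.List.enumerate l, 0 ≤ p.1 := by
  intro p hp
  obtain ⟨k, hk, rfl⟩ := (PySem.List.mem_enumerate_iff _ _ _).mp hp
  simp

-- ===== VERDICT (by name: the statement is the Claim_ definition above) =====
theorem row_to_column_order_spec : Claim_equal_row_to_column_order := by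
  intro items _
  show row_to_column_order items = row_to_column_order_alt items
  have hA : row_to_column_order items
      = (PySem.List.pyRange 0 5 1).foldl
          (fun res x =>
            (PySem.List.enumerate (pvPadA items)).foldl
              (fun res p => if p.1 % 5 == x then res ++ [p.2] else res) res)
          [] := rfl
  have hB : row_to_column_order_alt items
      = ((PySem.List.enumerate (pvPadB items)).foldl
          (fun (b : List (List String)) p =>
            b.set (p.1 % 5).toNat (b[(p.1 % 5).toNat]?.getD [] ++ [p.2]))
          [[], [], [], [], []]).foldl (fun res b => res ++ b) [] := rfl
  rw [hA, hB, pvPad_eq items]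
  rw [(by decide : PySem.List.pyRange 0 5 1 = [0, 1, 2, 3, 4])]
  rw [pvBuckets (PySem.List.enumerate (pvPadB items)) (pvEnumNonneg (pvPadB items))]
  simp only [List.foldl_cons, List.foldl_nil, List.nil_append]
  rw [pvInner, pvInner, pvInner, pvInner, pvInner]
  simp [List.append_assoc]
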